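-- pv_equiv track=rewrite | github.com/luisconceicaodev/University-Projects | Programação II/TPC2_48303.py | calorias_acumuladas
-- ===== SOURCE A (Python) =====
-- def calorias_acumuladas(dados, nome):
--     """
--     Cria uma lista, apartir da informação do input dados, com as calorias
--     acumuladas do atleta (nome).
--     Requires: dados é uma lista de tuplos e nome é uma string representando
--     o nome de um atleta
--     Ensures: Retorna uma lista com as calorias que o atleta (nome) acumulou
--     num ano
--
--     O(n), onde n representa a quantidade de atletas presentes na lista de
--     tuplos (dados) uma vez que esta função a percorre com um ciclo for.
--
--     Características e regiões:
--     -lista de tuplos vazia: True, False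
--     -nº de atleta diferentes na lista de tuplos: 0, 1, 2, 3, 4
--     -nº de repetições de um atleta: 0, >1
--     >>> calorias_acumuladas([], 'Ana') #True, 0, 0
--     []
--     >>> calorias_acumuladas([('Ana', 'Lisboa', 42195, '10-18', 2224)], 'Ana') #False, 1, 0
--     [2224]
--     >>> calorias_acumuladas([('Ana', 'Lisboa', 42195, '10-18', 2224), \
--     ('Eva', 'Nova Iorque', 42195, '06-13', 2319)], 'Eva') #False, 2, 0
--     [2319]
--     >>> calorias_acumuladas([('Ana', 'Lisboa', 42195, '10-18', 2224), \
--     ('Eva', 'Nova Iorque', 42195, '06-13', 2319), \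
--     ('Dulce', 'Toquio', 42195, '02-22', 2449)], 'Dulce') #False, 3, 0
--     [2449]
--     >>> calorias_acumuladas([('Ana', 'Lisboa', 42195, '10-18', 2224), \
--     ('Eva', 'Nova Iorque', 42195, '06-13', 2319), \
--     ('Ana', 'Toquio', 42195, '02-22', 2403)], 'Ana') #False, 2, >1
--     [2224, 4627]
--     >>> calorias_acumuladas([('Ana', 'Lisboa', 42195, '10-18', 2224), \
--     ('Eva', 'Nova Iorque', 42195, '06-13', 2319), \
--     ('Ana', 'Toquio', 42195, '02-22', 2403), \
--     ('Eva', 'Sao Paulo', 21098, '04-12', 1182), \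
--     ('Ana', 'Sao Paulo', 21098, '04-12', 1096), \
--     ('Dulce', 'Toquio', 42195, '02-22', 2449), \
--     ('Ana', 'Boston', 42195, '04-20', 2187)], 'Eva') #False, 3, >1
--     [2319, 3501]
--     """
--     lista = []
--     cal = 0
--     for tuplo in dados:
--         if nome == tuplo[0]:
--             cal += tuplo[4]
--             lista.append(cal)
--     return lista
-- ===== SOURCE B (Python) =====
-- def calorias_acumuladas(dados, nome):
--     # Backward pass: suffix sums of the athlete's calories (0 for the empty suffix).
--     suf = [0]
--     acum = 0
--     for t in reversed(dados):
--         if t[0] == nome: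
--             acum += t[4]
--             suf.append(acum)
--     suf.reverse()
--     # suf[i] = sum of the athlete's calories from the i-th match onwards;
--     # accumulated total at match i = grand total - suffix strictly after it.
--     total = suf[0]
--     return [total - s for s in suf[1:]]
-- ===== Notes on version B (the rewrite author's own statement) =====
-- stated objective: alternative
-- what changed: Instead of a forward loop carrying a running total, B traverses the data backwards building the suffix sums of the athlete's calories and then derives each accumulated value as grand total minus the suffix after that match.
import Mathlib
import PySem

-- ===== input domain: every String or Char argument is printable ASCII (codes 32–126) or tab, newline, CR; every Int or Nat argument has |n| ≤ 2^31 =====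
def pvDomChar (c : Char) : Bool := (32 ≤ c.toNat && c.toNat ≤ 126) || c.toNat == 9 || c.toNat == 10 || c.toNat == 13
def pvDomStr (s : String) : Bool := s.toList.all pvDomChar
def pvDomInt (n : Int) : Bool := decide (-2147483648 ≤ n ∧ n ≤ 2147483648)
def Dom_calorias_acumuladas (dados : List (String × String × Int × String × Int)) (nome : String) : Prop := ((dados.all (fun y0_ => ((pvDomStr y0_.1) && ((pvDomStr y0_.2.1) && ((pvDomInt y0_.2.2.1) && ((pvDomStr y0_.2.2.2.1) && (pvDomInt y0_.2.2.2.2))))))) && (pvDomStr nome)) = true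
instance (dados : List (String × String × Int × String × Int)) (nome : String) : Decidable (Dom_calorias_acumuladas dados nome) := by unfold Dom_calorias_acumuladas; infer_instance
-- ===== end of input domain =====

-- B computes the same accumulated-calories list by a different route: a backward pass builds
-- the suffix sums of the athlete's calories, and each output value is grand total minus the
-- suffix after that match (alternative algorithm, same O(n) cost).


-- ===== PORT A =====
-- literal port of A: one forward fold carrying (lista, cal); append cal after adding t[4]
def calorias_acumuladas (dados : List (String × String × Int × String × Int)) (nome : String) : List Int :=
  (dados.foldl
    (fun (st : List Int × Int) tuplo =>
      if nome == tuplo.1 then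
        let cal := st.2 + tuplo.2.2.2.2
        (st.1 ++ [cal], cal)
      else st)
    ([], 0)).1

-- ===== PORT B =====
-- port of B: backward pass over reversed(dados) carrying (suf, acum); then suf.reverse();
-- total = suf[0] (suf is never empty: it starts as [0]); output = [total - s for s in suf[1:]]
def calorias_acumuladas_alt (dados : List (String × String × Int × String × Int)) (nome : String) : List Int :=
  let st := dados.reverse.foldl
    (fun (st : List Int × Int) t =>
      if t.1 == nome then (st.1 ++ [st.2 + t.2.2.2.2], st.2 + t.2.2.2.2) else st)
    ([0], 0)
  let suf := st.1.reverse
  let total := suf.headD 0   -- suf[0]; suf is nonempty on every input (initialised to [0])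
  (PySem.List.slice suf (some 1) none).map (fun s => total - s)   -- suf[1:]

-- ===== PRECONDITION & SPEC =====
def Spec_calorias_acumuladas (dados : List (String × String × Int × String × Int)) (nome : String) (out : List Int) : Prop := out = calorias_acumuladas_alt dados nome
instance (dados : List (String × String × Int × String × Int)) (nome : String) (out : List Int) : Decidable (Spec_calorias_acumuladas dados nome out) := by unfold Spec_calorias_acumuladas; infer_instance

-- ===== CLAIM (what is proved, stated in full; the proofs are below) =====
def Claim_equal_calorias_acumuladas : Prop := ∀ (dados : List (String × String × Int × String × Int)) (nome : String), Dom_calorias_acumuladas dados nome → Spec_calorias_acumuladas dados nome (calorias_acumuladas dados nome)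

-- ===== LEMMAS AND PROOFS =====

-- prefix sums starting from c (proof-side characterisation of both folds)
def pvAccum (c : Int) : List Int → List Int
  | [] => []
  | x :: xs => (c + x) :: pvAccum (c + x) xs

lemma pvAccum_add (c d : Int) (xs : List Int) :
    pvAccum (c + d) xs = (pvAccum d xs).map (fun x => c + x) := by
  induction xs generalizing d with
  | nil => simp [pvAccum]
  | cons x xs ih =>
    simp only [pvAccum, List.map_cons, List.cons.injEq]
    exact ⟨by ring, by rw [add_assoc]; exact ih (d + x)⟩

lemma pvAccum_append (c : Int) (xs ys : List Int) :
    pvAccum c (xs ++ ys) = pvAccum c xs ++ pvAccum (c + xs.sum) ys := by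
  induction xs generalizing c with
  | nil => simp [pvAccum]
  | cons x xs ih => simp [pvAccum, ih, add_assoc]

-- A's fold (with condition nome == t.1) produces acc ++ prefix sums of the matched calories
lemma foldA_accum (nome : String) (dados : List (String × String × Int × String × Int))
    (acc : List Int) (cal : Int) :
    (dados.foldl
      (fun (st : List Int × Int) tuplo =>
        if nome == tuplo.1 then
          let c := st.2 + tuplo.2.2.2.2
          (st.1 ++ [c], c)
        else st)
      (acc, cal)).1
    = acc ++ pvAccum cal ((dados.filter (fun t => t.1 == nome)).map (fun t => t.2.2.2.2)) := by
  induction dados generalizing acc cal with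
  | nil => simp [pvAccum]
  | cons t ts ih =>
    simp only [List.foldl_cons, List.filter_cons]
    by_cases h : t.1 = nome
    · have h1 : (t.1 == nome) = true := beq_iff_eq.mpr h
      have h2 : (nome == t.1) = true := beq_iff_eq.mpr h.symm
      simp only [h1, h2, if_true, List.map_cons, pvAccum]
      rw [ih]
      simp
    · have h1 : (t.1 == nome) = false := beq_eq_false_iff_ne.mpr h
      have h2 : (nome == t.1) = false := beq_eq_false_iff_ne.mpr (fun e => h e.symm)
      simp only [h1, h2, Bool.false_eq_true, if_false]
      exact ih acc cal

-- B's fold (with condition t.1 == nome) has the same shape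
lemma foldB_accum (nome : String) (l : List (String × String × Int × String × Int))
    (acc : List Int) (cal : Int) :
    (l.foldl
      (fun (st : List Int × Int) t =>
        if t.1 == nome then (st.1 ++ [st.2 + t.2.2.2.2], st.2 + t.2.2.2.2) else st)
      (acc, cal)).1
    = acc ++ pvAccum cal ((l.filter (fun t => t.1 == nome)).map (fun t => t.2.2.2.2)) := by
  induction l generalizing acc cal with
  | nil => simp [pvAccum]
  | cons t ts ih =>
    simp only [List.foldl_cons, List.filter_cons]
    by_cases h : (t.1 == nome) = true
    · simp only [h, if_true, List.map_cons, pvAccum]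
      rw [ih]
      simp
    · simp only [h]
      exact ih acc cal

-- suffix-sum structure: reversed suffix sums with a trailing 0 are total :: (total - prefix sums)
lemma rev_accum (cs : List Int) :
    (pvAccum 0 cs.reverse).reverse ++ [0]
      = cs.sum :: (pvAccum 0 cs).map (fun x => cs.sum - x) := by
  induction cs with
  | nil => simp [pvAccum]
  | cons d ds ih =>
    have hsplit : pvAccum 0 (ds.reverse ++ [d]) =
        pvAccum 0 ds.reverse ++ [0 + ds.reverse.sum + d] := by
      rw [pvAccum_append]; rfl
    simp only [List.reverse_cons, hsplit, List.reverse_append, List.reverse_cons,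
      List.reverse_nil, List.nil_append, List.sum_reverse, zero_add, List.cons_append,
      List.sum_cons]
    rw [ih]
    simp only [pvAccum, List.map_cons, zero_add, List.cons.injEq]
    refine ⟨by ring, by ring_nf, ?_⟩
    have : pvAccum d ds = (pvAccum 0 ds).map (fun x => d + x) := by
      simpa using pvAccum_add d 0 ds
    rw [this, List.map_map]
    apply List.map_congr_left
    intro x _
    simp only [Function.comp]
    ring

-- ===== VERDICT (by name: the statement is the Claim_ definition above) =====
theorem calorias_acumuladas_spec : Claim_equal_calorias_acumuladas := by
  intro dados nome _
  show calorias_acumuladas dados nome = calorias_acumuladas_alt dados nome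
  set cs := (dados.filter (fun t => t.1 == nome)).map (fun t => t.2.2.2.2) with hcs
  have hA : calorias_acumuladas dados nome = pvAccum 0 cs := by
    simpa [calorias_acumuladas, hcs] using foldA_accum nome dados [] 0
  -- compute B
  have hfold := foldB_accum nome dados.reverse [0] 0
  have hrevcs : (dados.reverse.filter (fun t => t.1 == nome)).map (fun t => t.2.2.2.2)
      = cs.reverse := by simp [hcs]
  rw [hA]
  simp only [calorias_acumuladas_alt]
  rw [hfold, hrevcs]
  rw [List.reverse_append]
  simp only [List.reverse_cons, List.reverse_nil, List.nil_append]
  rw [rev_accum cs, PySem.List.slice_from_one]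
  simp only [List.headD_cons, List.tail_cons, List.map_map]
  have hid : ∀ (l : List Int), l.map ((fun x => cs.sum - x) ∘ fun x => cs.sum - x) = l := by
    intro l
    induction l with
    | nil => rfl
    | cons a l ih =>
      simp only [List.map_cons, ih, List.cons.injEq, Function.comp_apply]
      exact ⟨by ring, trivial⟩
  exact (hid _).symm
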